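-- pv_equiv track=rewrite | github.com/sabaly/Crypto_writeup | cryptohack/RSA/attacks.py | frac_from_contfrac
-- ===== SOURCE A (Python) =====
-- def frac_from_contfrac(cont_frac):
--     reversed = False
--     if cont_frac[0] == 0:
--         reversed = True
--         cont_frac = cont_frac[1:]
--     num = cont_frac[-1]
--     den = 1
--     for x in cont_frac[-2::-1]:
--         num, den = num*x + den, num
--     if reversed:
--         return den, num
--     return num, den
-- ===== SOURCE B (Python) =====
-- def frac_from_contfrac(cont_frac):
--     # Forward convergent recurrence over the whole list: a leading 0 needs no
--     # special case, since [0; a1, ...] automatically yields the reciprocal.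
--     num, num_prev = cont_frac[0], 1
--     den, den_prev = 1, 0
--     for x in cont_frac[1:]:
--         num, num_prev = x * num + num_prev, num
--         den, den_prev = x * den + den_prev, den
--     return num, den
-- ===== Notes on version B (the rewrite author's own statement) =====
-- stated objective: alternative
-- what changed: Drops the leading-zero strip-and-swap and the backward fold over the reversed slice, and instead runs the forward convergent recurrence (tracking the last two numerators and denominators) over the whole list in one branch-free pass; a leading 0 yields the reciprocal automatically.
-- outside the precondition, e.g. on frac_from_contfrac([0]): A raises IndexError, B returns (0, 1)
import Mathlib
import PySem

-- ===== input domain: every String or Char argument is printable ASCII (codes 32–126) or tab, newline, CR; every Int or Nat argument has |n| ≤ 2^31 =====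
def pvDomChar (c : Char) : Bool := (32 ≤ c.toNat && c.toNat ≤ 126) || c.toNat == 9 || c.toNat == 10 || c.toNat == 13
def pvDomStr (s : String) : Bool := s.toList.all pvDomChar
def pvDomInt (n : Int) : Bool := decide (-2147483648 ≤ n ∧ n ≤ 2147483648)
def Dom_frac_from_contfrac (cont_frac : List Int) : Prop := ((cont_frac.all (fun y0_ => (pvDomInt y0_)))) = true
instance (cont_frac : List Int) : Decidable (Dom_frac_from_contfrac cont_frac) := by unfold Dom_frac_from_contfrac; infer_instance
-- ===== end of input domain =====

-- B drops A's leading-zero strip-and-swap entirely and runs the forward convergent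
-- recurrence over the whole list in one branch-free pass (a leading 0 yields the
-- reciprocal automatically); same cost, genuinely different algorithm shape.


-- ===== PORT A =====
-- Literal port of A: strip a leading 0 (setting `rev`), seed (num, den) from the last
-- element, fold over cont_frac[-2::-1] (= dropLast then reverse), swap if `rev`.
-- cont_frac[0] / cont_frac[-1] raise IndexError on [] and [0]; those inputs are
-- outside Pre_, so the getLastD/headI defaults there are never relied upon.
def frac_from_contfrac (cont_frac : List Int) : Int × Int :=
  let revFlag : Bool := cont_frac.headI = 0
  let cf : List Int := if revFlag then cont_frac.tail else cont_frac
  let s : Int × Int :=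
    (cf.dropLast.reverse).foldl (fun (p : Int × Int) x => (p.1 * x + p.2, p.1)) (cf.getLastD 0, 1)
  if revFlag then (s.2, s.1) else (s.1, s.2)

-- ===== PORT B =====
-- Literal port of B: one branch-free forward pass over the whole list, carrying the
-- last two numerators and denominators. Python raises IndexError on [] at
-- cont_frac[0] (outside Pre_); the port's headI default 0 is never relied on there.
def frac_from_contfrac_alt (cont_frac : List Int) : Int × Int :=
  let s : Int × Int × Int × Int :=
    cont_frac.tail.foldl (fun (q : Int × Int × Int × Int) x =>
      (x * q.1 + q.2.1, q.1, x * q.2.2.1 + q.2.2.2, q.2.2.1)) (cont_frac.headI, 1, 1, 0)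
  (s.1, s.2.2.1)

-- ===== PRECONDITION & SPEC =====
-- Pre_ excludes exactly the inputs where Python A raises IndexError:
-- the empty list (cont_frac[0]) and [0] (cont_frac[-1] after stripping the 0).
def Pre_frac_from_contfrac (cont_frac : List Int) : Prop :=
  cont_frac ≠ [] ∧ (cont_frac.headI = 0 → cont_frac.tail ≠ [])
instance (cont_frac : List Int) : Decidable (Pre_frac_from_contfrac cont_frac) := by
  unfold Pre_frac_from_contfrac; infer_instance

def pvWitness_frac_from_contfrac : List Int := [0, 2, 3, 1]

def Spec_frac_from_contfrac (cont_frac : List Int) (out : Int × Int) : Prop := out = frac_from_contfrac_alt cont_frac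
instance (cont_frac : List Int) (out : Int × Int) : Decidable (Spec_frac_from_contfrac cont_frac out) := by unfold Spec_frac_from_contfrac; infer_instance

-- ===== CLAIM (what is proved, stated in full; the proofs are below) =====
def Claim_equal_frac_from_contfrac : Prop := ∀ (cont_frac : List Int), Dom_frac_from_contfrac cont_frac → Pre_frac_from_contfrac cont_frac → Spec_frac_from_contfrac cont_frac (frac_from_contfrac cont_frac)

-- ===== LEMMAS AND PROOFS =====

-- Continuant K [a0,…,an] : numerator of the continued fraction [a0; a1, …, an].
def contK : List Int → Int
  | [] => 1
  | [a] => a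
  | a :: b :: t => a * contK (b :: t) + contK t

-- contK of a list minus its last element, with the standard K₋₁ = 0 convention.
def contP : List Int → Int
  | [] => 0
  | a :: t => contK ((a :: t).dropLast)

theorem contK_cons (x : Int) (m : List Int) (h : m ≠ []) :
    contK (x :: m) = x * contK m + contK m.tail := by
  cases m with
  | nil => exact absurd rfl h
  | cons b t => simp [contK]

theorem contP_cons₂ (a b : Int) (t : List Int) :
    contP (a :: b :: t) = a * contP (b :: t) + contP t := by
  cases t with
  | nil => simp [contP, contK]
  | cons c t' =>
    show contK (a :: (b :: c :: t').dropLast) = _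
    have hd : (b :: c :: t').dropLast = b :: (c :: t').dropLast := by simp
    rw [hd, contK_cons a _ (by simp)]
    simp [contP]

theorem contK_append (m : List Int) (x : Int) :
    contK (m ++ [x]) = x * contK m + contP m := by
  induction m using contK.induct with
  | case1 => simp [contK, contP]
  | case2 a => simp [contK, contP]; ring
  | case3 a b t ih1 ih2 =>
    have : (a :: b :: t) ++ [x] = a :: b :: (t ++ [x]) := by simp
    rw [this, show contK (a :: b :: (t ++ [x])) = a * contK (b :: (t ++ [x])) + contK (t ++ [x]) from rfl]
    have hb : b :: (t ++ [x]) = (b :: t) ++ [x] := by simp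
    rw [hb, ih1, ih2, contP_cons₂, contK]
    ring

theorem contP_append (m : List Int) (x : Int) : contP (m ++ [x]) = contK m := by
  cases m with
  | nil => simp [contP, contK]
  | cons a t =>
    show contK ((a :: (t ++ [x])).dropLast) = contK (a :: t)
    rw [show a :: (t ++ [x]) = (a :: t) ++ [x] from rfl, List.dropLast_concat]

-- Forward (B-side) invariant: the fold carries the last two convergents.
theorem forward_fold (t : List Int) (a : Int) :
    t.foldl (fun (q : Int × Int × Int × Int) x =>
      (x * q.1 + q.2.1, q.1, x * q.2.2.1 + q.2.2.2, q.2.2.1)) (a, 1, 1, 0)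
      = (contK (a :: t), contP (a :: t), contK t, contP t) := by
  induction t using List.reverseRecOn with
  | nil => simp [contK, contP]
  | append_singleton t x ih =>
    rw [List.foldl_append, ih]
    simp only [List.foldl_cons, List.foldl_nil]
    have h1 : a :: (t ++ [x]) = (a :: t) ++ [x] := by simp
    rw [h1, contK_append, contP_append, contK_append, contP_append]

-- Backward (A-side) invariant, as a foldr over the untouched prefix.
theorem backward_foldr (l : List Int) (a : Int) :
    l.foldr (fun x (p : Int × Int) => (p.1 * x + p.2, p.1)) (a, 1)
      = (contK (l ++ [a]), contK ((l ++ [a]).tail)) := by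
  induction l with
  | nil => simp [contK]
  | cons x l ih =>
    rw [List.foldr_cons, ih]
    have hne : l ++ [a] ≠ [] := by simp
    rw [show ((x :: l) ++ [a]) = x :: (l ++ [a]) from rfl,
        contK_cons x _ hne]
    have ht : (x :: (l ++ [a])).tail = l ++ [a] := rfl
    rw [ht, Prod.mk.injEq]
    constructor
    · ring
    · rfl

-- A's fold on a nonempty list computes (contK cf, contK cf.tail).
theorem backward_eval (cf : List Int) (h : cf ≠ []) :
    (cf.dropLast.reverse).foldl (fun (p : Int × Int) x => (p.1 * x + p.2, p.1)) (cf.getLastD 0, 1)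
      = (contK cf, contK cf.tail) := by
  rw [List.foldl_reverse]
  have hgl : cf.getLastD 0 = cf.getLast h := by
    rw [List.getLastD_eq_getLast?, List.getLast?_eq_some_getLast h]; rfl
  rw [hgl]
  have hsplit : cf.dropLast ++ [cf.getLast h] = cf := List.dropLast_append_getLast h
  have := backward_foldr cf.dropLast (cf.getLast h)
  rw [hsplit] at this
  convert this using 2

-- B on a :: t computes (contK (a :: t), contK t).
theorem alt_eval (a : Int) (t : List Int) :
    frac_from_contfrac_alt (a :: t) = (contK (a :: t), contK t) := by
  unfold frac_from_contfrac_alt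
  rw [List.tail_cons, List.headI, forward_fold t a]

-- ===== VERDICT (by name: the statement is the Claim_ definition above) =====
theorem frac_from_contfrac_spec : Claim_equal_frac_from_contfrac := by
  intro cf _ hpre
  obtain ⟨hne, h0⟩ := hpre
  cases cf with
  | nil => exact absurd rfl hne
  | cons a t =>
    unfold Spec_frac_from_contfrac
    rw [alt_eval]
    unfold frac_from_contfrac
    by_cases hz : (a :: t).headI = 0
    · have hct : t ≠ [] := h0 hz
      have ha : a = 0 := by simpa [List.headI] using hz
      simp only [hz, decide_true, if_true, List.tail_cons, backward_eval t hct]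
      subst ha
      rw [contK_cons 0 t hct]
      simp
    · simp only [hz, decide_false, Bool.false_eq_true, if_false,
        backward_eval (a :: t) hne, List.tail_cons]
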